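-- pv_equiv track=rewrite | github.com/dgxwl/learnPython | guess.py | check
-- ===== SOURCE A (Python) =====
-- def check(answer, guess):
-- 	result = [0, 0]
-- 	for i in range(len(answer)):
-- 		for j in range(len(guess)):
-- 			if answer[i] == guess[j]:
-- 				result[0] += 1
-- 				if i == j:
-- 					result[1] += 1
-- 	return result
-- ===== SOURCE B (Python) =====
-- def check(answer, guess):
-- 	freq = {}
-- 	for ch in guess:
-- 		freq[ch] = freq.get(ch, 0) + 1
-- 	total = 0
-- 	for ch in answer:
-- 		total += freq.get(ch, 0)
-- 	pos = 0
-- 	for a, g in zip(answer, guess):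
-- 		if a == g:
-- 			pos += 1
-- 	return [total, pos]
-- ===== Notes on version B (the rewrite author's own statement) =====
-- stated objective: faster
-- what changed: Replaced the nested index loops (every answer char compared against every guess char) by a character-frequency dict over guess summed in one pass over answer for the total, plus a single zip pass for position matches.
import Mathlib
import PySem

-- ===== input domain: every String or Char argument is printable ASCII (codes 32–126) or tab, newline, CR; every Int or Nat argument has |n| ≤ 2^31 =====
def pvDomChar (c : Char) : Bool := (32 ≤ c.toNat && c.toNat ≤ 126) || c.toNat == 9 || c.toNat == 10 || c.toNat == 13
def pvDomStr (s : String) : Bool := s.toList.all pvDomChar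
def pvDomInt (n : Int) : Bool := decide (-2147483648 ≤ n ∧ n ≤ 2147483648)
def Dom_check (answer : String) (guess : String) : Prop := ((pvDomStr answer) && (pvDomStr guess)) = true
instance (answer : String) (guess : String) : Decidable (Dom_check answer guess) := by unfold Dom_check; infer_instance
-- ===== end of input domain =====

-- B replaces A's nested index loops by a guess-character frequency dict summed in
-- one pass over answer (total) plus one zip pass (position matches).


-- ===== PORT A =====
-- 'for i in range(len(answer)): for j in range(len(guess)): if answer[i]==guess[j]: …'
-- ported as nested folds over the enumerated character lists (same (index, char)
-- values in the same order); the Python list 'result = [0, 0]' with its two fixed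
-- cells is the pair state, returned as the two-element list.
def check (answer : String) (guess : String) : List Int :=
  let r : Int × Int :=
    (PySem.List.enumerate answer.toList 0).foldl (fun r p =>
      (PySem.List.enumerate guess.toList 0).foldl (fun r q =>
        if p.2 == q.2 then
          (r.1 + 1, if p.1 == q.1 then r.2 + 1 else r.2)
        else r) r) (0, 0)
  [r.1, r.2]

-- ===== PORT B =====
def check_alt (answer : String) (guess : String) : List Int :=
  let freq : PySem.Dict Char Int :=
    guess.toList.foldl (fun d ch => d.insert ch (d.getD ch 0 + 1)) PySem.Dict.empty
  let total : Int := answer.toList.foldl (fun s ch => s + freq.getD ch 0) 0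
  let pos : Int :=
    (List.zip answer.toList guess.toList).foldl
      (fun s (p : Char × Char) => if p.1 == p.2 then s + 1 else s) 0
  [total, pos]

-- ===== PRECONDITION & SPEC =====
def Spec_check (answer : String) (guess : String) (out : List Int) : Prop := out = check_alt answer guess
instance (answer : String) (guess : String) (out : List Int) : Decidable (Spec_check answer guess out) := by unfold Spec_check; infer_instance

-- ===== CLAIM (what is proved, stated in full; the proofs are below) =====
def Claim_equal_check : Prop := ∀ (answer : String) (guess : String), Dom_check answer guess → Spec_check answer guess (check answer guess)

-- ===== LEMMAS AND PROOFS =====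

-- A's inner loop, over any list of (index, char) pairs, adds to the accumulators
-- the number of matching chars and the number of matching (index, char) pairs.
theorem innerFold_eq (i : Int) (ai : Char) :
    ∀ (l : List (Int × Char)) (x y : Int),
      l.foldl (fun r q =>
        if ai == q.2 then (r.1 + 1, if i == q.1 then r.2 + 1 else r.2) else r) (x, y)
      = (x + (l.countP (fun q => ai == q.2) : Int),
         y + (l.countP (fun q => ai == q.2 && i == q.1) : Int)) := by
  intro l
  induction l with
  | nil => intro x y; simp
  | cons h t ih =>
    intro x y
    rw [List.foldl_cons, List.countP_cons, List.countP_cons]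
    rcases hc : (ai == h.2) with _ | _
    · rw [if_neg (by simp [hc]), ih]
      simp
    · rcases hi : (i == h.1) with _ | _ <;>
        · rw [if_pos (by simp [hc]), ih, Prod.mk.injEq]
          simp only [hc, hi, Bool.and_true, Bool.and_false, Bool.true_and,
            Bool.false_and]
          push_cast
          constructor <;> ring

-- counting matching characters over an enumeration ignores the indices
theorem countP_enumerate_snd (ai : Char) :
    ∀ (g : List Char) (s : Int),
      (PySem.List.enumerate g s).countP (fun q => ai == q.2) = g.count ai := by
  intro g
  induction g with
  | nil => intro s; simp [PySem.List.enumerate_nil]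
  | cons h t ih =>
    intro s
    simp only [PySem.List.enumerate_cons, List.countP_cons, List.count_cons, ih]
    by_cases hc : ai = h <;> simp [hc, BEq.comm]

-- at most one entry of an enumeration carries the index i
theorem countP_enumerate_key (ai : Char) :
    ∀ (g : List Char) (s i : Int),
      ((PySem.List.enumerate g s).countP (fun q => ai == q.2 && i == q.1) : Int)
      = if (s ≤ i ∧ g[(i - s).toNat]? = some ai) then 1 else 0 := by
  intro g
  induction g with
  | nil => intro s i; simp [PySem.List.enumerate_nil]
  | cons h t ih =>
    intro s i
    rw [PySem.List.enumerate_cons, List.countP_cons]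
    push_cast [ih]
    by_cases hi : i = s
    · have h1 : ¬ (s + 1 ≤ i) := by omega
      subst hi
      by_cases hc : ai = h
      · simp [hc, h1]
      · simp [hc, h1, Ne.symm hc]
    · rcases (by omega : (i - s).toNat = (i - (s + 1)).toNat + 1 ∨ i < s) with h2 | h2
      · have hle : (s ≤ i) ↔ (s + 1 ≤ i) := by omega
        simp [hi, h2, hle]
      · have h3 : ¬ (s ≤ i) := by omega
        have h4 : ¬ (s + 1 ≤ i) := by omega
        simp [hi, h3, h4]

-- a fold over a pair whose components evolve independently splits into two folds
theorem foldl_pair_split {α : Type} (c1 c2 : α → Int) :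
    ∀ (l : List α) (x y : Int),
      l.foldl (fun (r : Int × Int) a => (r.1 + c1 a, r.2 + c2 a)) (x, y)
      = (l.foldl (fun x a => x + c1 a) x, l.foldl (fun y a => y + c2 a) y) := by
  intro l
  induction l with
  | nil => intro x y; simp
  | cons h t ih => intro x y; simp [ih]

-- first component: summing guess-counts over the enumeration of answer = B's total pass
theorem fst_fold_eq (g : List Char) :
    ∀ (a : List Char) (s : Int) (x : Int),
      (PySem.List.enumerate a s).foldl (fun x p => x + (g.count p.2 : Int)) x
      = a.foldl (fun x ch => x + (g.count ch : Int)) x := by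
  intro a
  induction a with
  | nil => intro s x; simp [PySem.List.enumerate_nil]
  | cons h t ih => intro s x; simp [PySem.List.enumerate_cons, ih]

-- second component: position hits over the enumeration of answer = B's zip pass
theorem snd_fold_eq (g : List Char) :
    ∀ (a : List Char) (k : Nat) (y : Int),
      (PySem.List.enumerate a (k : Int)).foldl
        (fun y p => y + if ((0 : Int) ≤ p.1 ∧ g[p.1.toNat]? = some p.2) then 1 else 0) y
      = (List.zip a (g.drop k)).foldl
          (fun s (p : Char × Char) => if p.1 == p.2 then s + 1 else s) y := by
  intro a
  induction a with
  | nil => intro k y; simp [PySem.List.enumerate_nil]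
  | cons ai t ih =>
    intro k y
    rw [PySem.List.enumerate_cons, List.foldl_cons,
        show ((k : Int) + 1) = ((k + 1 : Nat) : Int) by push_cast; ring, ih (k + 1)]
    have hk : ((k : Int)).toNat = k := by omega
    cases hd : g.drop k with
    | nil =>
      have hlen : g.length ≤ k := by
        simpa [List.drop_eq_nil_iff] using hd
      have h0 : g[k]? = none := List.getElem?_eq_none hlen
      have h1 : g.drop (k + 1) = [] := by
        rw [List.drop_eq_nil_iff]; omega
      simp [hk, h0, h1]
    | cons gh rest =>
      have h1 : g[k]? = some gh := by
        have h := congrArg (fun l => l[0]?) hd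
        simpa [List.getElem?_drop] using h
      have h2 : g.drop (k + 1) = rest := by
        calc g.drop (k + 1) = (g.drop k).drop 1 := by rw [List.drop_drop]
          _ = rest := by rw [hd]; rfl
      rw [h2]
      by_cases hc : ai = gh
      · simp [hk, h1, hc]
      · simp [hk, h1, hc, Ne.symm hc]

-- the assembled equality of the two ports
theorem check_eq_alt (answer guess : String) :
    check answer guess = check_alt answer guess := by
  simp only [check, check_alt]
  have houter :
      (fun (r : Int × Int) (p : Int × Char) =>
        (PySem.List.enumerate guess.toList 0).foldl (fun r q =>
          if p.2 == q.2 then (r.1 + 1, if p.1 == q.1 then r.2 + 1 else r.2) else r) r)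
      = fun (r : Int × Int) (p : Int × Char) =>
          (r.1 + (guess.toList.count p.2 : Int),
           r.2 + if ((0 : Int) ≤ p.1 ∧ guess.toList[p.1.toNat]? = some p.2) then 1 else 0) := by
    funext r p
    rw [show r = (r.1, r.2) from rfl, innerFold_eq p.1 p.2,
        countP_enumerate_snd p.2 guess.toList 0,
        countP_enumerate_key p.2 guess.toList 0 p.1]
    simp
  have hsnd := snd_fold_eq guess.toList answer.toList 0 0
  simp only [Nat.cast_zero, List.drop_zero] at hsnd
  rw [houter, foldl_pair_split, fst_fold_eq guess.toList answer.toList 0, hsnd,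
      PySem.Dict.foldl_insert_getD_add_one_eq_counter]
  have hfreq : (fun (s : Int) (ch : Char) => s + (PySem.Dict.counter guess.toList).getD ch 0)
      = fun (s : Int) (ch : Char) => s + (guess.toList.count ch : Int) := by
    funext s ch
    rw [PySem.Dict.getD_counter]
  rw [hfreq]

-- ===== VERDICT (by name: the statement is the Claim_ definition above) =====
theorem check_spec : Claim_equal_check := by
  intro answer guess _
  unfold Spec_check
  exact check_eq_alt answer guess
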